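-- pv_equiv track=rewrite | github.com/NamiqPlanov/Python-practice | prefix_suffix.py | prefix_suffix
-- ===== SOURCE A (Python) =====
-- def prefix_suffix(arr):
--     n = len(arr)
--     ans = []
--     for i in range(n):
--         prefix1 = len(set(arr[:i+1]))
--         suffix1 = len(set(arr[i+1:]))
--         ans.append(prefix1-suffix1)
--     return ans
-- ===== SOURCE B (Python) =====
-- def prefix_suffix(arr):
--     pref = []
--     seen = set()
--     for x in arr:
--         seen.add(x)
--         pref.append(len(seen))
--     suf = []
--     seen = set()
--     for x in reversed(arr):
--         suf.append(len(seen))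
--         seen.add(x)
--     suf.reverse()
--     return [p - s for p, s in zip(pref, suf)]
-- ===== Notes on version B (the rewrite author's own statement) =====
-- stated objective: faster
-- what changed: Replaces per-index set construction over both slices with two incremental single passes (forward distinct counts, backward distinct counts) combined by a zip, removing the inner O(n) set builds.
import Mathlib
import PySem

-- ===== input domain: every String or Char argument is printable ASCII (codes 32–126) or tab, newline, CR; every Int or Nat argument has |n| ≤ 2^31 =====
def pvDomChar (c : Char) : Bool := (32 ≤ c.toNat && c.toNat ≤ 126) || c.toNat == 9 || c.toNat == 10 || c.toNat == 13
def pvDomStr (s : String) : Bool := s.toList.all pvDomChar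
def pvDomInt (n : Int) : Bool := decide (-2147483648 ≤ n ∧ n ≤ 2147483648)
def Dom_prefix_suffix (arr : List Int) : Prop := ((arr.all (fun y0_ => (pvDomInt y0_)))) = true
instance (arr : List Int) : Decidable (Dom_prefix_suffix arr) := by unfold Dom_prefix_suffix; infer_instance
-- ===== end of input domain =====

-- B replaces A's per-index set construction over both slices with two incremental
-- linear passes (forward/backward distinct counts) combined by a zip: O(n) vs O(n^2).

-- ===== PORT A =====
def prefix_suffix (arr : List Int) : List Int :=
  let n : Int := arr.length
  (PySem.List.pyRange 0 n 1).foldl (fun ans i =>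
    let prefix1 : Int := (PySem.Set.ofList (PySem.List.slice arr none (some (i + 1)))).length
    let suffix1 : Int := (PySem.Set.ofList (PySem.List.slice arr (some (i + 1)) none)).length
    ans ++ [prefix1 - suffix1]) []

-- ===== PORT B =====
-- forward pass: add x to seen, then append len(seen)
def psFwdStep (st : PySem.Set Int × List Int) (x : Int) : PySem.Set Int × List Int :=
  let s := PySem.Set.add st.1 x
  (s, st.2 ++ [(s.length : Int)])

-- backward pass over reversed(arr): append len(seen), then add x
def psBwdStep (st : PySem.Set Int × List Int) (x : Int) : PySem.Set Int × List Int :=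
  (PySem.Set.add st.1 x, st.2 ++ [(st.1.length : Int)])

def prefix_suffix_alt (arr : List Int) : List Int :=
  let pref := (arr.foldl psFwdStep (PySem.Set.empty, [])).2
  let suf := ((arr.reverse.foldl psBwdStep (PySem.Set.empty, [])).2).reverse
  List.zipWith (fun p s => p - s) pref suf

-- ===== PRECONDITION & SPEC =====
def Spec_prefix_suffix (arr : List Int) (out : List Int) : Prop := out = prefix_suffix_alt arr
instance (arr : List Int) (out : List Int) : Decidable (Spec_prefix_suffix arr out) := by unfold Spec_prefix_suffix; infer_instance

-- ===== CLAIM (what is proved, stated in full; the proofs are below) =====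
def Claim_equal_prefix_suffix : Prop := ∀ (arr : List Int), Dom_prefix_suffix arr → Spec_prefix_suffix arr (prefix_suffix arr)

-- ===== LEMMAS AND PROOFS =====

theorem foldl_append_map (f : Int → Int) (l : List Int) (acc : List Int) :
    l.foldl (fun a i => a ++ [f i]) acc = acc ++ l.map f := by
  induction l generalizing acc with
  | nil => simp
  | cons x xs ih => simp [List.foldl_cons, ih, List.append_assoc]

-- two Nodup lists with the same members have the same length
theorem length_ofList_congr (xs ys : List Int) (h : ∀ x, x ∈ xs ↔ x ∈ ys) :
    (PySem.Set.ofList xs).length = (PySem.Set.ofList ys).length := by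
  have hp : (PySem.Set.ofList xs).Perm (PySem.Set.ofList ys) := by
    rw [List.perm_ext_iff_of_nodup
      (PySem.Set.nodup_ofList xs)
      (PySem.Set.nodup_ofList ys)]
    intro a; simp [PySem.Set.mem_ofList, h a]
  exact hp.length_eq

theorem fwd_char (pre arr : List Int) (acc : List Int) :
    (arr.foldl psFwdStep (PySem.Set.ofList pre, acc)).2 =
      acc ++ (List.range arr.length).map
        (fun k => ((PySem.Set.ofList (pre ++ arr.take (k + 1))).length : Int)) := by
  induction arr generalizing pre acc with
  | nil => simp
  | cons x xs ih =>
    have hadd : PySem.Set.add (PySem.Set.ofList pre) x = PySem.Set.ofList (pre ++ [x]) :=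
      (PySem.Set.ofList_append_singleton pre x).symm
    simp only [List.foldl_cons, psFwdStep, hadd]
    rw [ih (pre ++ [x])]
    simp [List.range_succ_eq_map, List.map_map, Function.comp_def, List.append_assoc]

theorem bwd_char (pre arr : List Int) (acc : List Int) :
    (arr.foldl psBwdStep (PySem.Set.ofList pre, acc)).2 =
      acc ++ (List.range arr.length).map
        (fun k => ((PySem.Set.ofList (pre ++ arr.take k)).length : Int)) := by
  induction arr generalizing pre acc with
  | nil => simp
  | cons x xs ih =>
    have hadd : PySem.Set.add (PySem.Set.ofList pre) x = PySem.Set.ofList (pre ++ [x]) :=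
      (PySem.Set.ofList_append_singleton pre x).symm
    simp only [List.foldl_cons, psBwdStep, hadd]
    rw [ih (pre ++ [x])]
    simp [List.range_succ_eq_map, List.map_map, Function.comp_def, List.append_assoc]

theorem pref_eq (arr : List Int) :
    (arr.foldl psFwdStep (PySem.Set.empty, [])).2 =
      (List.range arr.length).map
        (fun k => ((PySem.Set.ofList (arr.take (k + 1))).length : Int)) := by
  have := fwd_char [] arr []
  simpa using this

theorem suf_eq (arr : List Int) :
    ((arr.reverse.foldl psBwdStep (PySem.Set.empty, [])).2).reverse =
      (List.range arr.length).map
        (fun k => ((PySem.Set.ofList (arr.drop (k + 1))).length : Int)) := by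
  have h := bwd_char [] arr.reverse []
  simp only [List.nil_append] at h
  rw [show (PySem.Set.empty : PySem.Set Int) = PySem.Set.ofList [] from rfl, h]
  apply List.ext_getElem
  · simp
  · intro j h1 h2
    simp only [List.length_reverse, List.length_map, List.length_range] at h1 h2
    rw [List.getElem_reverse]
    simp only [List.getElem_map, List.getElem_range, List.length_map, List.length_range,
      List.length_reverse]
    apply congrArg
    apply length_ofList_congr
    intro x
    rw [List.take_reverse]
    have hidx : arr.length - (arr.length - 1 - j) = j + 1 := by omega
    rw [hidx, List.mem_reverse]

theorem a_eq (arr : List Int) :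
    prefix_suffix arr = (List.range arr.length).map
      (fun k => ((PySem.Set.ofList (arr.take (k + 1))).length : Int)
        - ((PySem.Set.ofList (arr.drop (k + 1))).length : Int)) := by
  simp only [prefix_suffix, PySem.List.pyRange_one]
  have hn : ((arr.length : Int) - 0).toNat = arr.length := by omega
  rw [hn, foldl_append_map]
  simp only [List.nil_append, List.map_map]
  apply List.map_congr_left
  intro k _
  simp only [Function.comp_apply, zero_add]
  have h1 : (k : Int) + 1 = ((k + 1 : Nat) : Int) := by push_cast; ring
  rw [h1, PySem.List.slice_to_natCast, PySem.List.slice_from_natCast]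

theorem zipWith_sub_map_range (n : ℕ) (f g : ℕ → Int) :
    List.zipWith (fun p s => p - s) ((List.range n).map f) ((List.range n).map g)
      = (List.range n).map (fun k => f k - g k) := by
  induction n with
  | zero => simp
  | succ m ih =>
    simp only [List.range_succ, List.map_append]
    rw [List.zipWith_append (by simp), ih]
    simp

-- ===== VERDICT (by name: the statement is the Claim_ definition above) =====
theorem prefix_suffix_spec : Claim_equal_prefix_suffix := by
  intro arr _
  unfold Spec_prefix_suffix prefix_suffix_alt
  rw [pref_eq, suf_eq, zipWith_sub_map_range, a_eq]
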